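-- pv_equiv track=rewrite | github.com/MacKenzieOBrian/NLtoSQL | nl2sql/agent/agent_schema_linking.py | _tables_connected
-- ===== SOURCE A (Python) =====
-- def _build_fk_graph(schema_text: str) -> dict[str, set[str]]:
--     """Build an undirected table graph from join-hint lines."""
--     graph: dict[str, set[str]] = {}
--     for line in (schema_text or "").splitlines():
--         if not line.lower().startswith("join hints:"):
--             continue
--         for chunk in line.split(":", 1)[1].split(";"):
--             if "=" not in chunk:
--                 continue
--             left, right = [x.strip() for x in chunk.split("=", 1)]
--             if "." not in left or "." not in right:
--                 continue
--             lt = left.split(".", 1)[0].strip()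
--             rt = right.split(".", 1)[0].strip()
--             if not lt or not rt:
--                 continue
--             graph.setdefault(lt, set()).add(rt)
--             graph.setdefault(rt, set()).add(lt)
--     return graph
--
-- def _tables_connected(schema_text: str, tables: set[str]) -> bool:
--     if not tables or len(tables) == 1:
--         return True
--     graph = _build_fk_graph(schema_text)
--     if not graph:
--         return False
--     start = next(iter(tables))
--     seen = {start}
--     stack = [start]
--     while stack:
--         node = stack.pop()
--         for nxt in graph.get(node, set()):
--             if nxt not in seen:
--                 seen.add(nxt)
--                 stack.append(nxt)
--     return tables.issubset(seen)
-- ===== SOURCE B (Python) =====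
-- def _parse_edge(chunk):
--     """Parse one 'a.x = b.y' join hint; return (a, b) or None."""
--     if "=" not in chunk:
--         return None
--     left, right = (x.strip() for x in chunk.split("=", 1))
--     if "." not in left or "." not in right:
--         return None
--     lt = left.split(".", 1)[0].strip()
--     rt = right.split(".", 1)[0].strip()
--     if not lt or not rt:
--         return None
--     return lt, rt
--
--
-- def _fk_edges(schema_text):
--     """All FK edges (lt, rt) from the join-hint lines, in order."""
--     return [e
--             for line in schema_text.splitlines()
--             if line.lower().startswith("join hints:")
--             for chunk in line.split(":", 1)[1].split(";")
--             if (e := _parse_edge(chunk)) is not None]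
--
--
-- def _tables_connected(schema_text: str, tables: set[str]) -> bool:
--     if not tables or len(tables) == 1:
--         return True
--     # union-find by explicit disjoint components: fold every edge into a
--     # partition of the touched tables, merging the components it links.
--     comps = []
--     for lt, rt in _fk_edges(schema_text):
--         merged = {lt, rt}
--         rest = []
--         for c in comps:
--             if lt in c or rt in c:
--                 merged |= c
--             else:
--                 rest.append(c)
--         comps = rest + [merged]
--     start = next(iter(tables))
--     for c in comps:
--         if start in c:
--             return tables <= c
--     return False
-- ===== Notes on version B (the rewrite author's own statement) =====
-- stated objective: alternative
-- what changed: Replaces the explicit-stack DFS over a built adjacency dict (plus the redundant empty-graph guard) with a disjoint-set partition: edges are parsed to a flat list and folded into a list of merged components, then the answer is whether the component containing the first table contains them all.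
import Mathlib
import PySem

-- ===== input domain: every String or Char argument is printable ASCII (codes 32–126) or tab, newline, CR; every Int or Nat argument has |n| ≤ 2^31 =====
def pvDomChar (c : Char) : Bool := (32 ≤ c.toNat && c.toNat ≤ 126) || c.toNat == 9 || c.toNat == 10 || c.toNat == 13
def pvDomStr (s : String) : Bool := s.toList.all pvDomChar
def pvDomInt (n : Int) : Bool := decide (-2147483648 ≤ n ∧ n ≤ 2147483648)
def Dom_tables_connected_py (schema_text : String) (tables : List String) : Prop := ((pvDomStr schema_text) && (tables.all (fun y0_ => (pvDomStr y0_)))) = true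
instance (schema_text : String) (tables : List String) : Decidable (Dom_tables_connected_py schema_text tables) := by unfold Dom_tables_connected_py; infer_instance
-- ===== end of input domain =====

-- B replaces A's explicit-stack DFS over a built adjacency dict (and its redundant empty-graph
-- guard) with a disjoint-set partition folded over a flat edge list; return values proved equal.

-- ===== PORT A =====

-- chunks = line.split(":", 1)[1].split(";")   (the [1] cannot raise: the line starts with "join hints:")
def pvChunksOf (line : String) : List String :=
  (PySem.Str.split? (PySem.List.pyGetD ((PySem.Str.splitMax? line ":" 1).getD []) 1 "") ";").getD []

-- body of A's inner 'for chunk in …' loop (the 'continue's become nested ifs)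
def pvInsChunk (graph : PySem.Dict String (PySem.Set String)) (chunk : String) :
    PySem.Dict String (PySem.Set String) :=
  if ¬ PySem.Str.isIn "=" chunk then graph
  else
    let parts := (PySem.Str.splitMax? chunk "=" 1).getD []   -- "=" in chunk: exactly 2 parts
    let left := PySem.Str.strip (PySem.List.pyGetD parts 0 "")
    let right := PySem.Str.strip (PySem.List.pyGetD parts 1 "")
    if ¬ PySem.Str.isIn "." left ∨ ¬ PySem.Str.isIn "." right then graph
    else
      let lt := PySem.Str.strip (PySem.List.pyGetD ((PySem.Str.splitMax? left "." 1).getD []) 0 "")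
      let rt := PySem.Str.strip (PySem.List.pyGetD ((PySem.Str.splitMax? right "." 1).getD []) 0 "")
      if lt = "" ∨ rt = "" then graph
      else
        -- graph.setdefault(lt, set()).add(rt); graph.setdefault(rt, set()).add(lt)
        let g1 := graph.insert lt (PySem.Set.add (PySem.Dict.getD graph lt []) rt)
        g1.insert rt (PySem.Set.add (PySem.Dict.getD g1 rt []) lt)

def pvBuildFkGraph (schema_text : String) : PySem.Dict String (PySem.Set String) :=
  (PySem.Str.splitlines schema_text).foldl
    (fun graph line =>
      if ¬ PySem.Str.startswith (PySem.Str.lower line) "join hints:" then graph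
      else (pvChunksOf line).foldl pvInsChunk graph)
    PySem.Dict.empty

-- termination helpers for the DFS loop
def pvNodes (g : PySem.Dict String (PySem.Set String)) : List String :=
  (PySem.Dict.items g).flatMap (fun kv => kv.1 :: kv.2)

def pvCnt (g : PySem.Dict String (PySem.Set String)) (seen : List String) : Nat :=
  ((pvNodes g).filter (fun x => decide (x ∉ seen))).length

-- body of 'for nxt in graph.get(node, set()): …'
def pvDfsStep (acc : PySem.Set String × List String) (nxt : String) :
    PySem.Set String × List String :=
  if PySem.Set.contains acc.1 nxt then acc else (PySem.Set.add acc.1 nxt, nxt :: acc.2)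

theorem pvCnt_add_lt (g : PySem.Dict String (PySem.Set String)) (seen : PySem.Set String)
    (n : String) (hg : n ∈ pvNodes g) (hn : n ∉ seen) :
    pvCnt g (PySem.Set.add seen n) < pvCnt g seen := by
  unfold pvCnt
  rw [PySem.Set.add_of_not_mem hn]
  have h1 : (pvNodes g).filter (fun x => decide (x ∉ seen ++ [n]))
      = ((pvNodes g).filter (fun x => decide (x ∉ seen))).filter (fun x => decide (x ≠ n)) := by
    rw [List.filter_filter]
    apply List.filter_congr
    intro x _
    simp [List.mem_append]
    rw [Bool.and_comm]
  rw [h1]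
  have hmem : n ∈ (pvNodes g).filter (fun x => decide (x ∉ seen)) :=
    List.mem_filter.mpr ⟨hg, by simp [hn]⟩
  set m := (pvNodes g).filter (fun x => decide (x ∉ seen)) with hm
  have hsub : (m.filter (fun x => decide (x ≠ n))).Sublist m := List.filter_sublist
  rcases Nat.lt_or_ge (m.filter (fun x => decide (x ≠ n))).length m.length with h | h
  · exact h
  · exfalso
    have heq : m.filter (fun x => decide (x ≠ n)) = m :=
      hsub.eq_of_length (Nat.le_antisymm (List.Sublist.length_le hsub) h)
    have hmem' : n ∈ m.filter (fun x => decide (x ≠ n)) := by rw [heq]; exact hmem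
    simp at hmem'

theorem mem_pvNodes_of_mem_getD (g : PySem.Dict String (PySem.Set String)) (node : String) :
    ∀ n ∈ PySem.Dict.getD g node [], n ∈ pvNodes g := by
  intro n hn
  rw [PySem.Dict.getD_eq_get?_getD] at hn
  cases h : PySem.Dict.get? g node with
  | none => rw [h] at hn; simp at hn
  | some v =>
      rw [h] at hn
      simp only [Option.getD_some] at hn
      have hmem : (node, v) ∈ g.items := PySem.Dict.mem_items_of_get?_eq_some g h
      unfold pvNodes
      exact List.mem_flatMap.mpr ⟨(node, v), hmem, by simp [hn]⟩

theorem pvDfsStep_measure (g : PySem.Dict String (PySem.Set String)) :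
    ∀ (ns : List String) (seen : PySem.Set String) (rest : List String),
      (∀ n ∈ ns, n ∈ pvNodes g) →
      2 * pvCnt g (ns.foldl pvDfsStep (seen, rest)).1 + (ns.foldl pvDfsStep (seen, rest)).2.length
        ≤ 2 * pvCnt g seen + rest.length := by
  intro ns
  induction ns with
  | nil => intro seen rest _; simp
  | cons n ns ih =>
      intro seen rest h
      simp only [List.foldl_cons, pvDfsStep]
      by_cases hc : PySem.Set.contains seen n = true
      · rw [if_pos hc]
        exact ih seen rest (fun m hm => h m (List.mem_cons_of_mem _ hm))
      · rw [if_neg hc]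
        have hn : n ∉ seen := fun hmem => hc ((PySem.Set.contains_iff _ _).mpr hmem)
        have hlt := pvCnt_add_lt g seen n (h n (List.mem_cons_self)) hn
        have hle := ih (PySem.Set.add seen n) (n :: rest)
          (fun m hm => h m (List.mem_cons_of_mem _ hm))
        simp only [List.length_cons] at hle ⊢
        omega

-- the while-stack DFS loop; the stack keeps its top at the head (list.pop() pops Python's last
-- element, i.e. the most recently pushed one)
def pvDfs (g : PySem.Dict String (PySem.Set String)) (seen : PySem.Set String)
    (stack : List String) : PySem.Set String :=
  match stack with
  | [] => seen
  | node :: rest =>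
      let p := (PySem.Dict.getD g node []).foldl pvDfsStep (seen, rest)
      pvDfs g p.1 p.2
termination_by 2 * pvCnt g seen + stack.length
decreasing_by
  have h := pvDfsStep_measure g (PySem.Dict.getD g node []) seen rest
    (mem_pvNodes_of_mem_getD g node)
  simp only [List.length_cons]
  omega

def tables_connected_py (schema_text : String) (tables : List String) : Bool :=
  if tables.isEmpty || tables.length == 1 then true
  else
    let graph := pvBuildFkGraph schema_text
    if PySem.Dict.size graph == 0 then false
    else
      -- start = next(iter(tables)): any representative; the result is independent of the choice
      let start := tables.headD ""
      PySem.Set.issubset tables (pvDfs graph (PySem.Set.ofList [start]) [start])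

-- ===== PORT B =====

-- _parse_edge(chunk): (lt, rt) or None
def pvParseChunk (chunk : String) : Option (String × String) :=
  if ¬ PySem.Str.isIn "=" chunk then none
  else
    let parts := (PySem.Str.splitMax? chunk "=" 1).getD []
    let left := PySem.Str.strip (PySem.List.pyGetD parts 0 "")
    let right := PySem.Str.strip (PySem.List.pyGetD parts 1 "")
    if ¬ PySem.Str.isIn "." left ∨ ¬ PySem.Str.isIn "." right then none
    else
      let lt := PySem.Str.strip (PySem.List.pyGetD ((PySem.Str.splitMax? left "." 1).getD []) 0 "")
      let rt := PySem.Str.strip (PySem.List.pyGetD ((PySem.Str.splitMax? right "." 1).getD []) 0 "")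
      if lt = "" ∨ rt = "" then none else some (lt, rt)

-- _fk_edges(schema_text): the flat comprehension
def pvFkEdges (schema_text : String) : List (String × String) :=
  (PySem.Str.splitlines schema_text).flatMap
    (fun line =>
      if PySem.Str.startswith (PySem.Str.lower line) "join hints:" then
        (((PySem.Str.split? (PySem.List.pyGetD ((PySem.Str.splitMax? line ":" 1).getD []) 1 "")
            ";").getD [])).filterMap pvParseChunk
      else [])

-- one edge folded into the partition: merge every component touching the edge
def pvMergeStep (comps : List (PySem.Set String)) (e : String × String) :
    List (PySem.Set String) :=
  let p := comps.foldl
    (fun (acc : PySem.Set String × List (PySem.Set String)) c =>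
      if PySem.Set.contains c e.1 || PySem.Set.contains c e.2 then (PySem.Set.union acc.1 c, acc.2)
      else (acc.1, acc.2 ++ [c]))
    (PySem.Set.ofList [e.1, e.2], [])
  p.2 ++ [p.1]

def tables_connected_py_alt (schema_text : String) (tables : List String) : Bool :=
  if tables.isEmpty || tables.length == 1 then true
  else
    let comps := (pvFkEdges schema_text).foldl pvMergeStep []
    let start := tables.headD ""
    match comps.find? (fun c => PySem.Set.contains c start) with
    | some c => PySem.Set.issubset tables c
    | none => false

-- ===== PRECONDITION & SPEC =====
-- 'tables' ports a Python set[str]: by the type convention the list holds DISTINCT elements, so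
-- Pre_ requires exactly that; a list with duplicates corresponds to no Python input at all.
def Pre_tables_connected_py (schema_text : String) (tables : List String) : Prop :=
  tables.Nodup
instance (schema_text : String) (tables : List String) :
    Decidable (Pre_tables_connected_py schema_text tables) := by
  unfold Pre_tables_connected_py; infer_instance

def pvWitness_tables_connected_py : String × List String :=
  ("Join Hints: a.x = b.y; b.z = c.w", ["a", "b", "c"])

def Spec_tables_connected_py (schema_text : String) (tables : List String) (out : Bool) : Prop :=
  out = tables_connected_py_alt schema_text tables
instance (schema_text : String) (tables : List String) (out : Bool) :
    Decidable (Spec_tables_connected_py schema_text tables out) := by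
  unfold Spec_tables_connected_py; infer_instance

-- ===== CLAIM (what is proved, stated in full; the proofs are below) =====
def Claim_equal_tables_connected_py : Prop :=
  ∀ (schema_text : String) (tables : List String), Dom_tables_connected_py schema_text tables →
    Pre_tables_connected_py schema_text tables →
    Spec_tables_connected_py schema_text tables (tables_connected_py schema_text tables)

-- ===== LEMMAS AND PROOFS =====

-- the undirected edge relation of an edge list, its nodes, and connectivity
def pvEdgeRel (E : List (String × String)) (a b : String) : Prop := (a, b) ∈ E ∨ (b, a) ∈ E

def pvConn (E : List (String × String)) (a b : String) : Prop :=
  Relation.ReflTransGen (pvEdgeRel E) a b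

def pvNodesE (E : List (String × String)) : List String := E.flatMap (fun e => [e.1, e.2])

-- the double insertion A performs for one edge
def pvIns (g : PySem.Dict String (PySem.Set String)) (lt rt : String) :
    PySem.Dict String (PySem.Set String) :=
  let g1 := g.insert lt (PySem.Set.add (PySem.Dict.getD g lt []) rt)
  g1.insert rt (PySem.Set.add (PySem.Dict.getD g1 rt []) lt)

-- A's chunk body is B's parser followed by the double insertion
theorem pvInsChunk_eq (g : PySem.Dict String (PySem.Set String)) (chunk : String) :
    pvInsChunk g chunk =
      match pvParseChunk chunk with
      | none => g
      | some e => pvIns g e.1 e.2 := by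
  simp only [pvInsChunk, pvParseChunk, pvIns]
  split_ifs <;> rfl

-- A's graph is the fold of the double insertion over B's edge list
theorem pvChunks_foldl_eq (chunks : List String) :
    ∀ g : PySem.Dict String (PySem.Set String),
      chunks.foldl pvInsChunk g =
        (chunks.filterMap pvParseChunk).foldl (fun g e => pvIns g e.1 e.2) g := by
  induction chunks with
  | nil => intro g; rfl
  | cons ch chunks ih =>
      intro g
      simp only [List.foldl_cons, List.filterMap_cons, pvInsChunk_eq g ch]
      cases h : pvParseChunk ch with
      | none => simpa using ih g
      | some e => simpa using ih (pvIns g e.1 e.2)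

theorem pvBuildFkGraph_eq (schema_text : String) :
    pvBuildFkGraph schema_text =
      (pvFkEdges schema_text).foldl (fun g e => pvIns g e.1 e.2) PySem.Dict.empty := by
  unfold pvBuildFkGraph pvFkEdges pvChunksOf
  generalize PySem.Str.splitlines schema_text = lines
  generalize PySem.Dict.empty = g0
  induction lines generalizing g0 with
  | nil => rfl
  | cons line lines ih =>
      simp only [List.foldl_cons, List.flatMap_cons]
      by_cases hs : PySem.Str.startswith (PySem.Str.lower line) "join hints:" = true
      · rw [if_neg (not_not_intro hs), if_pos hs, List.foldl_append, pvChunks_foldl_eq]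
        exact ih _
      · rw [if_pos hs, if_neg hs]
        simpa using ih g0

theorem mem_getD_pvIns (g : PySem.Dict String (PySem.Set String)) (lt rt a b : String) :
    b ∈ PySem.Dict.getD (pvIns g lt rt) a [] ↔
      b ∈ PySem.Dict.getD g a [] ∨ (a = lt ∧ b = rt) ∨ (a = rt ∧ b = lt) := by
  simp only [pvIns, PySem.Dict.getD_insert]
  by_cases h1 : a = rt <;> by_cases h2 : a = lt <;> by_cases h3 : rt = lt <;>
    simp_all [PySem.Set.mem_add]

theorem mem_getD_foldl_pvIns (E : List (String × String)) :
    ∀ (g : PySem.Dict String (PySem.Set String)) (a b : String),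
      b ∈ PySem.Dict.getD (E.foldl (fun g e => pvIns g e.1 e.2) g) a [] ↔
        b ∈ PySem.Dict.getD g a [] ∨ pvEdgeRel E a b := by
  induction E with
  | nil => intro g a b; simp [pvEdgeRel]
  | cons e E ih =>
      intro g a b
      simp only [List.foldl_cons]
      rw [ih, mem_getD_pvIns]
      simp only [pvEdgeRel, List.mem_cons, Prod.ext_iff]
      constructor
      · rintro ((h | h) | h) <;> tauto
      · rintro (h | h) <;> tauto

-- adjacency of A's graph = the edge relation of B's edge list
theorem pvGraph_adj (schema_text : String) (a b : String) :
    b ∈ PySem.Dict.getD (pvBuildFkGraph schema_text) a [] ↔ pvEdgeRel (pvFkEdges schema_text) a b := by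
  rw [pvBuildFkGraph_eq, mem_getD_foldl_pvIns]
  simp [PySem.Dict.getD_empty]

theorem pvGraph_size_zero (schema_text : String) :
    PySem.Dict.size (pvBuildFkGraph schema_text) = 0 ↔ pvFkEdges schema_text = [] := by
  constructor
  · intro h
    cases hE : pvFkEdges schema_text with
    | nil => rfl
    | cons e E =>
        exfalso
        have hadj : e.2 ∈ PySem.Dict.getD (pvBuildFkGraph schema_text) e.1 [] := by
          rw [pvGraph_adj, hE]
          exact Or.inl (List.mem_cons_self)
        have hempty : pvBuildFkGraph schema_text = PySem.Dict.empty := by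
          apply PySem.Dict.ext
          have : (pvBuildFkGraph schema_text).items.length = 0 := h
          simp [List.length_eq_zero_iff.mp this, PySem.Dict.empty]
        rw [hempty] at hadj
        simp [PySem.Dict.getD_empty] at hadj
  · intro h
    rw [pvBuildFkGraph_eq, h]
    rfl

-- ----- DFS characterisation -----

theorem pvDfsStep_mem1 (ns : List String) :
    ∀ (seen : PySem.Set String) (rest : List String) (x : String),
      x ∈ (ns.foldl pvDfsStep (seen, rest)).1 ↔ x ∈ seen ∨ x ∈ ns := by
  induction ns with
  | nil => intro seen rest x; simp
  | cons n ns ih =>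
      intro seen rest x
      simp only [List.foldl_cons, pvDfsStep]
      by_cases hc : PySem.Set.contains seen n = true
      · have hn : n ∈ seen := (PySem.Set.contains_iff _ _).mp hc
        rw [if_pos hc, ih]
        simp only [List.mem_cons]
        constructor
        · rintro (h | h) <;> tauto
        · rintro (h | h | h) <;> (try subst h) <;> tauto
      · rw [if_neg hc, ih]
        simp [PySem.Set.mem_add]
        tauto

theorem pvDfsStep_mem2 (ns : List String) :
    ∀ (seen : PySem.Set String) (rest : List String) (x : String),
      x ∈ (ns.foldl pvDfsStep (seen, rest)).2 ↔ x ∈ rest ∨ (x ∈ ns ∧ x ∉ seen) := by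
  induction ns with
  | nil => intro seen rest x; simp
  | cons n ns ih =>
      intro seen rest x
      simp only [List.foldl_cons, pvDfsStep]
      by_cases hc : PySem.Set.contains seen n = true
      · have hn : n ∈ seen := (PySem.Set.contains_iff _ _).mp hc
        rw [if_pos hc, ih]
        simp only [List.mem_cons]
        constructor
        · rintro (h | ⟨h1, h2⟩) <;> tauto
        · rintro (h | ⟨h1 | h1, h2⟩) <;> (try subst h1) <;> tauto
      · have hn : n ∉ seen := fun hmem => hc ((PySem.Set.contains_iff _ _).mpr hmem)
        rw [if_neg hc, ih]
        simp only [List.mem_cons, PySem.Set.mem_add]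
        constructor
        · rintro ((rfl | h) | ⟨h1, h2⟩)
          · exact Or.inr ⟨Or.inl rfl, hn⟩
          · exact Or.inl h
          · exact Or.inr ⟨Or.inr h1, fun hs => h2 (Or.inl hs)⟩
        · rintro (h | ⟨rfl | h1, h2⟩)
          · exact Or.inl (Or.inr h)
          · exact Or.inl (Or.inl rfl)
          · by_cases hx : x = n
            · exact Or.inl (Or.inl hx)
            · exact Or.inr ⟨h1, fun hs => hs.elim h2 hx⟩

theorem pvDfs_supset (g : PySem.Dict String (PySem.Set String)) (seen : PySem.Set String)
    (stack : List String) : ∀ x ∈ seen, x ∈ pvDfs g seen stack := by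
  induction seen, stack using pvDfs.induct g with
  | case1 seen => intro x hx; rw [pvDfs]; exact hx
  | case2 seen node rest p ih =>
      intro x hx
      rw [pvDfs]
      exact ih x ((pvDfsStep_mem1 _ _ _ _).mpr (Or.inl hx))

theorem pvDfs_sound (g : PySem.Dict String (PySem.Set String)) (P : String → Prop)
    (hP : ∀ a b, P a → b ∈ PySem.Dict.getD g a [] → P b) (seen : PySem.Set String)
    (stack : List String) (hseen : ∀ s ∈ seen, P s) (hstack : ∀ n ∈ stack, n ∈ seen) :
    ∀ x ∈ pvDfs g seen stack, P x := by
  induction seen, stack using pvDfs.induct g with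
  | case1 seen => intro x hx; rw [pvDfs] at hx; exact hseen x hx
  | case2 seen node rest p ih =>
      intro x hx
      rw [pvDfs] at hx
      have hPnode : P node := hseen node (hstack node (List.mem_cons_self))
      refine ih ?_ ?_ x hx
      · intro s hs
        rcases (pvDfsStep_mem1 _ _ _ _).mp hs with h | h
        · exact hseen s h
        · exact hP node s hPnode h
      · intro n hn
        rcases (pvDfsStep_mem2 _ _ _ _).mp hn with h | ⟨h1, _⟩
        · exact (pvDfsStep_mem1 _ _ _ _).mpr
            (Or.inl (hstack n (List.mem_cons_of_mem _ h)))
        · exact (pvDfsStep_mem1 _ _ _ _).mpr (Or.inr h1)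

theorem pvDfs_closed (g : PySem.Dict String (PySem.Set String)) (seen : PySem.Set String)
    (stack : List String) (hstack : ∀ n ∈ stack, n ∈ seen)
    (hcl : ∀ a ∈ seen, a ∈ stack ∨ ∀ b ∈ PySem.Dict.getD g a [], b ∈ seen) :
    ∀ a ∈ pvDfs g seen stack, ∀ b ∈ PySem.Dict.getD g a [], b ∈ pvDfs g seen stack := by
  induction seen, stack using pvDfs.induct g with
  | case1 seen =>
      intro a ha b hb
      rw [pvDfs] at ha ⊢
      rcases hcl a ha with h | h
      · simp at h
      · exact h b hb
  | case2 seen node rest p ih =>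
      intro a ha b hb
      rw [pvDfs] at ha ⊢
      refine ih ?_ ?_ a ha b hb
      · intro n hn
        rcases (pvDfsStep_mem2 _ _ _ _).mp hn with h | ⟨h1, _⟩
        · exact (pvDfsStep_mem1 _ _ _ _).mpr
            (Or.inl (hstack n (List.mem_cons_of_mem _ h)))
        · exact (pvDfsStep_mem1 _ _ _ _).mpr (Or.inr h1)
      · intro c hc
        rcases (pvDfsStep_mem1 _ _ _ _).mp hc with h | h
        · rcases hcl c h with hm | hm
          · rcases List.mem_cons.mp hm with rfl | hm
            · right
              intro b' hb'
              exact (pvDfsStep_mem1 _ _ _ _).mpr (Or.inr hb')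
            · left
              exact (pvDfsStep_mem2 _ _ _ _).mpr (Or.inl hm)
          · right
            intro b' hb'
            exact (pvDfsStep_mem1 _ _ _ _).mpr (Or.inl (hm b' hb'))
        · by_cases hseen : c ∈ seen
          · rcases hcl c hseen with hm | hm
            · rcases List.mem_cons.mp hm with rfl | hm
              · right
                intro b' hb'
                exact (pvDfsStep_mem1 _ _ _ _).mpr (Or.inr hb')
              · left
                exact (pvDfsStep_mem2 _ _ _ _).mpr (Or.inl hm)
            · right
              intro b' hb'
              exact (pvDfsStep_mem1 _ _ _ _).mpr (Or.inl (hm b' hb'))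
          · left
            exact (pvDfsStep_mem2 _ _ _ _).mpr (Or.inr ⟨h, hseen⟩)

theorem pvDfs_mem (g : PySem.Dict String (PySem.Set String)) (start x : String) :
    x ∈ pvDfs g (PySem.Set.ofList [start]) [start] ↔
      Relation.ReflTransGen (fun a b => b ∈ PySem.Dict.getD g a []) start x := by
  have hof : PySem.Set.ofList [start] = [start] :=
    PySem.Set.ofList_eq_self_of_nodup [start] (List.nodup_singleton start)
  rw [hof]
  constructor
  · intro hx
    refine pvDfs_sound g (fun y => Relation.ReflTransGen (fun a b => b ∈ PySem.Dict.getD g a []) start y)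
      (fun a b ha hb => ha.tail hb) [start] [start] ?_ (fun n hn => hn) x hx
    intro s hs
    rcases List.mem_singleton.mp hs with rfl
    exact Relation.ReflTransGen.refl
  · intro hreach
    induction hreach with
    | refl => exact pvDfs_supset g [start] [start] start (List.mem_singleton.mpr rfl)
    | tail h1 h2 ih =>
        exact pvDfs_closed g [start] [start] (fun n hn => hn)
          (fun a ha => Or.inl ha) _ ih _ h2

-- ----- partition characterisation -----

theorem pvMerge_memU (e : String × String) (comps : List (PySem.Set String)) :
    ∀ (acc : PySem.Set String × List (PySem.Set String)) (x : String),
      x ∈ (comps.foldl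
        (fun (acc : PySem.Set String × List (PySem.Set String)) c =>
          if PySem.Set.contains c e.1 || PySem.Set.contains c e.2 then
            (PySem.Set.union acc.1 c, acc.2)
          else (acc.1, acc.2 ++ [c])) acc).1 ↔
        x ∈ acc.1 ∨ ∃ c ∈ comps, (e.1 ∈ c ∨ e.2 ∈ c) ∧ x ∈ c := by
  induction comps with
  | nil => intro acc x; simp
  | cons c comps ih =>
      intro acc x
      simp only [List.foldl_cons]
      by_cases ht : (e.1 ∈ c ∨ e.2 ∈ c)
      · rw [if_pos (by simp only [Bool.or_eq_true, PySem.Set.contains_iff]; exact ht)]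
        rw [ih]
        simp only [PySem.Set.mem_union, List.mem_cons]
        constructor
        · rintro ((h | h) | ⟨c', hc', h1, h2⟩)
          · exact Or.inl h
          · exact Or.inr ⟨c, Or.inl rfl, ht, h⟩
          · exact Or.inr ⟨c', Or.inr hc', h1, h2⟩
        · rintro (h | ⟨c', (rfl | hc'), h1, h2⟩)
          · exact Or.inl (Or.inl h)
          · exact Or.inl (Or.inr h2)
          · exact Or.inr ⟨c', hc', h1, h2⟩
      · rw [if_neg (by simp only [Bool.or_eq_true, PySem.Set.contains_iff]; exact ht)]
        rw [ih]
        simp only [List.mem_cons]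
        constructor
        · rintro (h | ⟨c', hc', h1, h2⟩)
          · exact Or.inl h
          · exact Or.inr ⟨c', Or.inr hc', h1, h2⟩
        · rintro (h | ⟨c', (rfl | hc'), h1, h2⟩)
          · exact Or.inl h
          · exact absurd h1 ht
          · exact Or.inr ⟨c', hc', h1, h2⟩

theorem pvMerge_memR (e : String × String) (comps : List (PySem.Set String)) :
    ∀ (acc : PySem.Set String × List (PySem.Set String)) (c : PySem.Set String),
      c ∈ (comps.foldl
        (fun (acc : PySem.Set String × List (PySem.Set String)) c =>
          if PySem.Set.contains c e.1 || PySem.Set.contains c e.2 then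
            (PySem.Set.union acc.1 c, acc.2)
          else (acc.1, acc.2 ++ [c])) acc).2 ↔
        c ∈ acc.2 ∨ (c ∈ comps ∧ ¬(e.1 ∈ c ∨ e.2 ∈ c)) := by
  induction comps with
  | nil => intro acc c; simp
  | cons c0 comps ih =>
      intro acc c
      simp only [List.foldl_cons]
      by_cases ht : (e.1 ∈ c0 ∨ e.2 ∈ c0)
      · rw [if_pos (by simp only [Bool.or_eq_true, PySem.Set.contains_iff]; exact ht)]
        rw [ih]
        simp only [List.mem_cons]
        constructor
        · rintro (h | ⟨h1, h2⟩)
          · exact Or.inl h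
          · exact Or.inr ⟨Or.inr h1, h2⟩
        · rintro (h | ⟨rfl | h1, h2⟩)
          · exact Or.inl h
          · exact absurd ht h2
          · exact Or.inr ⟨h1, h2⟩
      · rw [if_neg (by simp only [Bool.or_eq_true, PySem.Set.contains_iff]; exact ht)]
        rw [ih]
        simp only [List.mem_cons, List.mem_append, List.not_mem_nil, or_false]
        constructor
        · rintro ((h | rfl) | ⟨h1, h2⟩)
          · exact Or.inl h
          · exact Or.inr ⟨Or.inl rfl, ht⟩
          · exact Or.inr ⟨Or.inr h1, h2⟩
        · rintro (h | ⟨rfl | h1, h2⟩)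
          · exact Or.inl (Or.inl h)
          · exact Or.inl (Or.inr rfl)
          · exact Or.inr ⟨h1, h2⟩

def pvComps (E : List (String × String)) : List (PySem.Set String) := E.foldl pvMergeStep []

theorem pvConn_symm (E : List (String × String)) {a b : String} (h : pvConn E a b) : pvConn E b a := by
  exact Relation.ReflTransGen.symmetric (fun x y hxy => by unfold pvEdgeRel at *; tauto) h

theorem pvConn_mono (E : List (String × String)) (e : String × String) {a b : String}
    (h : pvConn E a b) : pvConn (E ++ [e]) a b := by
  refine Relation.ReflTransGen.mono ?_ h
  intro x y hxy
  unfold pvEdgeRel at *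
  simp only [List.mem_append]
  tauto

-- closure under connectivity follows from the edge-wise invariant alone
theorem pvClosed_of_c1 (E : List (String × String)) (comps : List (PySem.Set String))
    (hc : ∀ e ∈ E, ∀ c ∈ comps, (e.1 ∈ c ↔ e.2 ∈ c)) {x y : String} (h : pvConn E x y) :
    ∀ c ∈ comps, x ∈ c → y ∈ c := by
  induction h with
  | refl => intro c _ hx; exact hx
  | tail _ hbc ih =>
      intro c hcm hx
      have hb := ih c hcm hx
      rcases hbc with he | he
      · exact (hc _ he c hcm).mp hb
      · exact (hc _ he c hcm).mpr hb

-- the three-part invariant of the partition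
theorem pvComps_inv (E : List (String × String)) :
    (∀ x, (∃ c ∈ pvComps E, x ∈ c) ↔ x ∈ pvNodesE E) ∧
    (∀ c ∈ pvComps E, ∀ x ∈ c, ∀ y ∈ c, pvConn E x y) ∧
    (∀ e ∈ E, ∀ c ∈ pvComps E, (e.1 ∈ c ↔ e.2 ∈ c)) := by
  induction E using List.reverseRecOn with
  | nil =>
      refine ⟨?_, ?_, ?_⟩
      · intro x; simp [pvComps, pvNodesE]
      · intro c hc; simp [pvComps] at hc
      · intro e he; simp at he
  | append_singleton E e ih =>
      obtain ⟨ha, hb, hc⟩ := ih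
      have hfold : pvComps (E ++ [e]) = pvMergeStep (pvComps E) e := by
        simp [pvComps, List.foldl_append]
      set comps := pvComps E with hcomps
      -- the merged component and the untouched rest
      set p := comps.foldl
        (fun (acc : PySem.Set String × List (PySem.Set String)) c =>
          if PySem.Set.contains c e.1 || PySem.Set.contains c e.2 then
            (PySem.Set.union acc.1 c, acc.2)
          else (acc.1, acc.2 ++ [c]))
        (PySem.Set.ofList [e.1, e.2], []) with hp
      have hstep : pvComps (E ++ [e]) = p.2 ++ [p.1] := by
        rw [hfold]; rfl
      have hU : ∀ x, x ∈ p.1 ↔ (x = e.1 ∨ x = e.2) ∨ ∃ c ∈ comps, (e.1 ∈ c ∨ e.2 ∈ c) ∧ x ∈ c := by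
        intro x
        rw [hp, pvMerge_memU]
        simp [PySem.Set.mem_ofList]
      have hR : ∀ c, c ∈ p.2 ↔ c ∈ comps ∧ ¬(e.1 ∈ c ∨ e.2 ∈ c) := by
        intro c
        rw [hp, pvMerge_memR]
        simp
      have hmemC : ∀ c, c ∈ pvComps (E ++ [e]) ↔ c ∈ p.2 ∨ c = p.1 := by
        intro c; rw [hstep]; simp
      have hnodes : ∀ x, x ∈ pvNodesE (E ++ [e]) ↔ x ∈ pvNodesE E ∨ x = e.1 ∨ x = e.2 := by
        intro x; simp [pvNodesE]
      -- every element of the merged component is connected (in E ++ [e]) to e.1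
      have hstepconn : pvConn (E ++ [e]) e.2 e.1 :=
        Relation.ReflTransGen.single (Or.inr (by simp))
      have hz : ∀ z ∈ p.1, pvConn (E ++ [e]) z e.1 := by
        intro z hz
        rcases (hU z).mp hz with (rfl | rfl) | ⟨c, hcm, (h1 | h1), h2⟩
        · exact Relation.ReflTransGen.refl
        · exact hstepconn
        · exact pvConn_mono E e (hb c hcm z h2 e.1 h1)
        · exact Relation.ReflTransGen.trans
            (pvConn_mono E e (hb c hcm z h2 e.2 h1)) hstepconn
      refine ⟨?_, ?_, ?_⟩
      · -- (a) union of components = nodes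
        intro x
        rw [hnodes]
        constructor
        · rintro ⟨c, hcm, hx⟩
          rcases (hmemC c).mp hcm with h | rfl
          · have := (hR c).mp h
            exact Or.inl ((ha x).mp ⟨c, this.1, hx⟩)
          · rcases (hU x).mp hx with (rfl | rfl) | ⟨c', hc', _, hx'⟩
            · tauto
            · tauto
            · exact Or.inl ((ha x).mp ⟨c', hc', hx'⟩)
        · rintro (hx | rfl | rfl)
          · obtain ⟨c, hcm, hxc⟩ := (ha x).mpr hx
            by_cases ht : (e.1 ∈ c ∨ e.2 ∈ c)
            · exact ⟨p.1, (hmemC _).mpr (Or.inr rfl), (hU x).mpr (Or.inr ⟨c, hcm, ht, hxc⟩)⟩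
            · exact ⟨c, (hmemC c).mpr (Or.inl ((hR c).mpr ⟨hcm, ht⟩)), hxc⟩
          · exact ⟨p.1, (hmemC _).mpr (Or.inr rfl), (hU _).mpr (Or.inl (Or.inl rfl))⟩
          · exact ⟨p.1, (hmemC _).mpr (Or.inr rfl), (hU _).mpr (Or.inl (Or.inr rfl))⟩
      · -- (b) components are connected
        intro c hcm x hx y hy
        rcases (hmemC c).mp hcm with h | rfl
        · exact pvConn_mono E e (hb c ((hR c).mp h).1 x hx y hy)
        · exact Relation.ReflTransGen.trans (hz x hx)
            (pvConn_symm _ (hz y hy))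
      · -- (c) every processed edge has both ends in the same component
        intro f hf c hcm
        have hdir : ∀ a b : String, ((a, b) ∈ E ∨ (b, a) ∈ E) → a ∈ p.1 → b ∈ p.1 := by
          intro a b hab hap
          have hbn : b ∈ pvNodesE E := by
            rcases hab with h | h <;>
              exact List.mem_flatMap.mpr ⟨_, h, by simp⟩
          obtain ⟨c₂, hc₂, hbc₂⟩ := (ha b).mpr hbn
          have hac₂ : a ∈ c₂ := by
            rcases hab with h | h
            · exact (hc _ h c₂ hc₂).mpr hbc₂
            · exact (hc _ h c₂ hc₂).mp hbc₂
          have htouch : e.1 ∈ c₂ ∨ e.2 ∈ c₂ := by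
            rcases (hU a).mp hap with (rfl | rfl) | ⟨c', hc', hw, hac'⟩
            · exact Or.inl hac₂
            · exact Or.inr hac₂
            · rcases hw with hw | hw
              · exact Or.inl (pvClosed_of_c1 E comps hc (hb c' hc' a hac' e.1 hw) c₂ hc₂ hac₂)
              · exact Or.inr (pvClosed_of_c1 E comps hc (hb c' hc' a hac' e.2 hw) c₂ hc₂ hac₂)
          exact (hU b).mpr (Or.inr ⟨c₂, hc₂, htouch, hbc₂⟩)
        rcases List.mem_append.mp hf with hf | hf
        · rcases (hmemC c).mp hcm with h | rfl
          · exact hc f hf c ((hR c).mp h).1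
          · constructor
            · intro h1; exact hdir f.1 f.2 (Or.inl (by simpa using hf)) h1
            · intro h2; exact hdir f.2 f.1 (Or.inr (by simpa using hf)) h2
        · rcases List.mem_singleton.mp hf with rfl
          rcases (hmemC c).mp hcm with h | rfl
          · have := ((hR c).mp h).2
            constructor
            · intro h1; exact absurd (Or.inl h1) this
            · intro h2; exact absurd (Or.inr h2) this
          · constructor
            · intro _; exact (hU _).mpr (Or.inl (Or.inr rfl))
            · intro _; exact (hU _).mpr (Or.inl (Or.inl rfl))

theorem pvComps_closed (E : List (String × String)) {x y : String} (h : pvConn E x y) :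
    ∀ c ∈ pvComps E, x ∈ c → y ∈ c :=
  pvClosed_of_c1 E (pvComps E) (pvComps_inv E).2.2 h

theorem pvConn_eq_of_adj (E : List (String × String))
    (g : PySem.Dict String (PySem.Set String))
    (hadj : ∀ a b, b ∈ PySem.Dict.getD g a [] ↔ pvEdgeRel E a b) (a b : String) :
    Relation.ReflTransGen (fun a b => b ∈ PySem.Dict.getD g a []) a b ↔ pvConn E a b := by
  constructor
  · exact fun h => Relation.ReflTransGen.mono (fun x y hxy => (hadj x y).mp hxy) h
  · exact fun h => Relation.ReflTransGen.mono (fun x y hxy => (hadj x y).mpr hxy) h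

theorem pvConn_isolated (E : List (String × String)) {start x : String}
    (h : pvConn E start x) (hs : start ∉ pvNodesE E) : x = start := by
  rcases Relation.ReflTransGen.cases_head h with rfl | ⟨b, hab, _⟩
  · rfl
  · exfalso
    apply hs
    rcases hab with he | he <;>
      exact List.mem_flatMap.mpr ⟨_, he, by simp⟩

-- ===== VERDICT (by name: the statement is the Claim_ definition above) =====
theorem tables_connected_py_spec : Claim_equal_tables_connected_py := by
  intro schema_text tables _hdom hpre
  unfold Spec_tables_connected_py
  unfold tables_connected_py tables_connected_py_alt
  by_cases hg : (tables.isEmpty || tables.length == 1) = true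
  · simp only [hg, if_true]
  · rw [if_neg hg, if_neg hg]
    have hcompsdef : (pvFkEdges schema_text).foldl pvMergeStep [] = pvComps (pvFkEdges schema_text) := rfl
    rw [hcompsdef]
    -- tables has at least two distinct elements
    have hglen : ¬ tables.isEmpty = true ∧ ¬ (tables.length == 1) = true := by
      constructor <;> intro h <;> apply hg <;> simp [h]
    have hne : tables ≠ [] := fun h => hglen.1 (by simp [h])
    obtain ⟨t0, tl, rfl⟩ := List.exists_cons_of_ne_nil hne
    have hne2 : tl ≠ [] := by rintro rfl; exact hglen.2 (by simp)
    obtain ⟨t1, ts, rfl⟩ := List.exists_cons_of_ne_nil hne2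
    simp only [List.headD_cons]
    set E := pvFkEdges schema_text with hE
    set comps := pvComps E with hcomps
    set start := t0 with hstart
    obtain ⟨ha, hb, hc⟩ := pvComps_inv E
    have hdfs : ∀ x, x ∈ pvDfs (pvBuildFkGraph schema_text) (PySem.Set.ofList [start]) [start]
        ↔ pvConn E start x := by
      intro x
      rw [pvDfs_mem]
      exact pvConn_eq_of_adj E _ (fun a b => pvGraph_adj schema_text a b) start x
    by_cases hsn : start ∈ pvNodesE E
    · -- start is an endpoint of some edge: both sides test the same component
      have hEne : E ≠ [] := by
        intro h; rw [h] at hsn; simp [pvNodesE] at hsn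
      rw [if_neg (by
        simp only [beq_iff_eq]
        intro h
        exact hEne ((pvGraph_size_zero schema_text).mp h))]
      obtain ⟨c₀, hc₀, hsc₀⟩ := (ha start).mpr hsn
      cases hfind : comps.find? (fun c => PySem.Set.contains c start) with
      | none =>
          exfalso
          have := List.find?_eq_none.mp hfind c₀ hc₀
          exact this ((PySem.Set.contains_iff _ _).mpr hsc₀)
      | some c =>
          have hcmem : c ∈ comps := List.mem_of_find?_eq_some hfind
          have hp : PySem.Set.contains c start = true := by
            simpa using List.find?_some hfind
          have hcs : start ∈ c := (PySem.Set.contains_iff _ _).mp hp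
          have hiff : ∀ t, t ∈ c ↔ pvConn E start t := by
            intro t
            constructor
            · exact fun h => hb c hcmem start hcs t h
            · exact fun h => pvComps_closed E h c hcmem hcs
          rw [Bool.eq_iff_iff]
          simp only [PySem.Set.issubset_iff]
          constructor
          · intro h t ht
            exact (hiff t).mpr ((hdfs t).mp (h t ht))
          · intro h t ht
            exact (hdfs t).mpr ((hiff t).mp (h t ht))
    · -- start touches no edge: both sides are false
      have hfind : comps.find? (fun c => PySem.Set.contains c start) = none := by
        apply List.find?_eq_none.mpr
        intro c hcm hp
        exact hsn ((ha start).mp ⟨c, hcm, (PySem.Set.contains_iff _ _).mp hp⟩)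
      rw [hfind]
      by_cases hsz : (PySem.Dict.size (pvBuildFkGraph schema_text) == 0) = true
      · rw [if_pos hsz]
      · rw [if_neg hsz]
        rw [Bool.eq_false_iff]
        intro hsub
        have hall := (PySem.Set.issubset_iff _ _).mp hsub
        have h1 : t1 = start := pvConn_isolated E ((hdfs t1).mp (hall t1 (by simp))) hsn
        unfold Pre_tables_connected_py at hpre
        rw [h1, hstart] at hpre
        exact (List.nodup_cons.mp hpre).1 (by simp)
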